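-- pv_equiv track=rewrite | github.com/hsu-binfo/NanoSMN | utils/ontSMNtools.py | __infer_mapping_score
-- ===== SOURCE A (Python) =====
-- def __infer_mapping_score(nodes, ref_nodes):
--   all_matches = []
--   match = []
--   score = 0
--   last_index = None
--   for node in nodes:
--     node = int(node)
--     if node in ref_nodes:
--       index = ref_nodes.index(node)
--       if last_index is None:
--         match = []
--         # match.append(node)
--       elif index == last_index + 1:
--         # match.append(node)
--         pass
--       else:
--         all_matches.append(match)
--         match = []
--       match.append(node)
--
--       score +=1
--       last_index = index
--     else:
--       continue
--   if len(match) > 0: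
--     all_matches.append(match)
--   return score, all_matches
-- ===== SOURCE B (Python) =====
-- from itertools import groupby
--
-- def __infer_mapping_score(nodes, ref_nodes):
--     matched = [(int(n), ref_nodes.index(int(n))) for n in nodes if int(n) in ref_nodes]
--     all_matches = [
--         [node for _, (node, _) in grp]
--         for _, grp in groupby(enumerate(matched), key=lambda p: p[1][1] - p[0])
--     ]
--     return len(matched), all_matches
-- ===== Notes on version B (the rewrite author's own statement) =====
-- stated objective: alternative
-- what changed: Replaces A's last_index/match state machine with a two-phase computation: a filtering pass building (node, first-ref-index) pairs, then itertools.groupby over enumerate(matched) keyed by index minus position to emit consecutive-index runs.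
import Mathlib
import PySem

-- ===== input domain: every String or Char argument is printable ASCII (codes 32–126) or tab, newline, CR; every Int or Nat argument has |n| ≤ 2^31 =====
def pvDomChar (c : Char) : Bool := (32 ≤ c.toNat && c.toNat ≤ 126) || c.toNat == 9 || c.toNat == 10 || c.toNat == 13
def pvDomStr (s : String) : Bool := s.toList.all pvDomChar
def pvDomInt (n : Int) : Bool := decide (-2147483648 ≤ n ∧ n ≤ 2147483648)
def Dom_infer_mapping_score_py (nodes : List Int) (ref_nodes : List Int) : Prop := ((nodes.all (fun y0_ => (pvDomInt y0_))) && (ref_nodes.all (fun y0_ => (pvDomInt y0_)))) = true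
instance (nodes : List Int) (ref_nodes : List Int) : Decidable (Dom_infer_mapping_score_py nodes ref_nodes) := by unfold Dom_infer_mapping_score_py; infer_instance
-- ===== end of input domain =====

-- B replaces A's last_index/match state machine by a filter pass (matched nodes with their
-- first ref index) followed by the itertools.groupby index-minus-position run-grouping trick;
-- objective: alternative decomposition, same cost.

-- ===== PORT A =====
-- one iteration of A's for-loop; state = (all_matches, match, score, last_index)
def pvStepA (ref_nodes : List Int)
    (st : List (List Int) × List Int × Int × Option Int) (node : Int) :
    List (List Int) × List Int × Int × Option Int :=
  let (all_matches, mtch, score, last_index) := st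
  if node ∈ ref_nodes then
    match PySem.List.index? ref_nodes node with
    | some index =>
      match last_index with
      | none => (all_matches, ([] : List Int) ++ [node], score + 1, some (index : Int))
      | some li =>
        if (index : Int) = li + 1 then (all_matches, mtch ++ [node], score + 1, some (index : Int))
        else (all_matches ++ [mtch], ([] : List Int) ++ [node], score + 1, some (index : Int))
    | none => st  -- unreachable: node ∈ ref_nodes guarantees index? is some
  else st

def infer_mapping_score_py (nodes : List Int) (ref_nodes : List Int) : Int × List (List Int) :=
  let st := nodes.foldl (pvStepA ref_nodes) ([], [], 0, none)
  let (all_matches, mtch, score, _) := st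
  if mtch.length > 0 then (score, all_matches ++ [mtch]) else (score, all_matches)

-- ===== PORT B =====
-- groupby(…, key = index - position): group consecutive pairs with equal key, emit node values
def pvGroupGo (k : Int) (cur : List Int) : List (Int × Int) → List (List Int)
  | [] => [cur]
  | (k', n) :: rest =>
      if k' = k then pvGroupGo k (cur ++ [n]) rest
      else cur :: pvGroupGo k' [n] rest

def pvGroupBy : List (Int × Int) → List (List Int)
  | [] => []
  | (k, n) :: rest => pvGroupGo k [n] rest

def infer_mapping_score_py_alt (nodes : List Int) (ref_nodes : List Int) : Int × List (List Int) :=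
  let matched := nodes.filterMap (fun n =>
    match PySem.List.index? ref_nodes n with
    | some i => some (n, (i : Int))
    | none => none)
  let keyed := (PySem.List.enumerate matched 0).map (fun p => (p.2.2 - p.1, p.2.1))
  ((matched.length : Int), pvGroupBy keyed)

-- ===== PRECONDITION & SPEC =====
def Spec_infer_mapping_score_py (nodes : List Int) (ref_nodes : List Int) (out : Int × List (List Int)) : Prop := out = infer_mapping_score_py_alt nodes ref_nodes
instance (nodes : List Int) (ref_nodes : List Int) (out : Int × List (List Int)) : Decidable (Spec_infer_mapping_score_py nodes ref_nodes out) := by unfold Spec_infer_mapping_score_py; infer_instance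

-- ===== CLAIM (what is proved, stated in full; the proofs are below) =====
def Claim_equal_infer_mapping_score_py : Prop := ∀ (nodes : List Int) (ref_nodes : List Int), Dom_infer_mapping_score_py nodes ref_nodes → Spec_infer_mapping_score_py nodes ref_nodes (infer_mapping_score_py nodes ref_nodes)

-- ===== LEMMAS AND PROOFS =====

-- the matched (node, first-index) pairs both programs are driven by
def pvPairs (ref_nodes nodes : List Int) : List (Int × Int) :=
  nodes.filterMap (fun n =>
    match PySem.List.index? ref_nodes n with
    | some i => some (n, (i : Int))
    | none => none)

-- A's loop body restricted to a matched pair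
def pvStepP : (List (List Int) × List Int × Int × Option Int) → (Int × Int) →
    List (List Int) × List Int × Int × Option Int
  | (all_matches, _, score, none), p => (all_matches, [p.1], score + 1, some p.2)
  | (all_matches, mtch, score, some li), p =>
    if p.2 = li + 1 then (all_matches, mtch ++ [p.1], score + 1, some p.2)
    else (all_matches ++ [mtch], [p.1], score + 1, some p.2)

def pvFin (st : List (List Int) × List Int × Int × Option Int) : Int × List (List Int) :=
  if st.2.1.length > 0 then (st.2.2.1, st.1 ++ [st.2.1]) else (st.2.2.1, st.1)

-- reference grouping used as the meeting point of the two proofs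
def pvSpecGroups (li : Int) (cur : List Int) : List (Int × Int) → List (List Int)
  | [] => [cur]
  | (n, i) :: rest =>
      if i = li + 1 then pvSpecGroups i (cur ++ [n]) rest
      else cur :: pvSpecGroups i [n] rest

theorem foldA_eq_foldP (ref_nodes nodes : List Int)
    (st : List (List Int) × List Int × Int × Option Int) :
    nodes.foldl (pvStepA ref_nodes) st = (pvPairs ref_nodes nodes).foldl pvStepP st := by
  induction nodes generalizing st with
  | nil => rfl
  | cons n ns ih =>
    by_cases hm : n ∈ ref_nodes
    · obtain ⟨i, hi⟩ := Option.isSome_iff_exists.mp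
        ((PySem.List.index?_isSome_iff (xs := ref_nodes) (v := n)).mpr hm)
      obtain ⟨all, mtch, score, last⟩ := st
      have hi' : List.idxOf? n ref_nodes = some i := by
        rw [← PySem.List.index?_eq_idxOf?]; exact hi
      have hstep : pvStepA ref_nodes (all, mtch, score, last) n
          = pvStepP (all, mtch, score, last) (n, (i : Int)) := by
        cases last <;> simp [pvStepA, pvStepP, hm, hi']
      simp only [List.foldl_cons, pvPairs, List.filterMap_cons, hi]
      rw [ih, hstep]
      rfl
    · have hnone : PySem.List.index? ref_nodes n = none := by
        rw [PySem.List.index?_eq_none_iff]; exact hm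
      simp only [List.foldl_cons, pvPairs, List.filterMap_cons, hnone]
      rw [ih]
      obtain ⟨all, mtch, score, last⟩ := st
      simp only [pvStepA, if_neg hm]
      rfl

theorem foldP_fin (rest : List (Int × Int)) (all : List (List Int)) (cur : List Int)
    (score li : Int) (hcur : cur ≠ []) :
    pvFin (rest.foldl pvStepP (all, cur, score, some li))
      = (score + rest.length, all ++ pvSpecGroups li cur rest) := by
  induction rest generalizing all cur score li with
  | nil =>
    simp [pvFin, pvSpecGroups, List.length_pos_iff, hcur]
  | cons p ps ih =>
    obtain ⟨n, i⟩ := p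
    simp only [List.foldl_cons, pvStepP, pvSpecGroups]
    by_cases h : i = li + 1
    · rw [if_pos h, if_pos h, ih _ _ _ _ (by simp)]
      simp only [Prod.mk.injEq, List.length_cons]
      exact ⟨by push_cast; ring, by simp⟩
    · rw [if_neg h, if_neg h, ih _ _ _ _ (by simp)]
      simp only [Prod.mk.injEq, List.length_cons]
      exact ⟨by push_cast; ring, by simp⟩

theorem groupGo_eq_specGroups (rest : List (Int × Int)) (j li : Int) (cur : List Int) :
    pvGroupGo (li - j) cur ((PySem.List.enumerate rest (j + 1)).map
        (fun p => (p.2.2 - p.1, p.2.1)))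
      = pvSpecGroups li cur rest := by
  induction rest generalizing j li cur with
  | nil => rfl
  | cons p ps ih =>
    obtain ⟨n, i⟩ := p
    rw [PySem.List.enumerate_cons]
    simp only [List.map_cons, pvGroupGo, pvSpecGroups]
    by_cases h : i = li + 1
    · rw [if_pos (by omega), if_pos h]
      have := ih (j + 1) i (cur ++ [n])
      rw [show i - (j + 1) = li - j by omega] at this
      rw [← this]
    · rw [if_neg (by omega), if_neg h]
      rw [← ih (j + 1) i [n]]

-- ===== VERDICT (by name: the statement is the Claim_ definition above) =====
theorem infer_mapping_score_py_spec : Claim_equal_infer_mapping_score_py := by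
  intro nodes ref_nodes _
  show infer_mapping_score_py nodes ref_nodes = infer_mapping_score_py_alt nodes ref_nodes
  have hA : infer_mapping_score_py nodes ref_nodes
      = pvFin ((pvPairs ref_nodes nodes).foldl pvStepP ([], [], 0, none)) := by
    unfold infer_mapping_score_py
    rw [foldA_eq_foldP]
    rfl
  rw [hA]
  show _ = ((((pvPairs ref_nodes nodes).length : Int)),
      pvGroupBy ((PySem.List.enumerate (pvPairs ref_nodes nodes) 0).map
        (fun p => (p.2.2 - p.1, p.2.1))))
  cases hp : pvPairs ref_nodes nodes with
  | nil => rfl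
  | cons p rest =>
    obtain ⟨n, i⟩ := p
    rw [PySem.List.enumerate_cons]
    simp only [List.foldl_cons, pvStepP, pvGroupBy, List.map_cons]
    rw [foldP_fin _ _ _ _ _ (by simp), groupGo_eq_specGroups rest 0 i [n]]
    simp only [Prod.mk.injEq, List.length_cons, List.nil_append]
    exact ⟨by push_cast; ring, by simp⟩
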